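-- pv_equiv track=rewrite | github.com/CAW-Busteed/Python | PracticePython.Exercises/April2023/changecounter/change_counter.py | coin_count
-- ===== SOURCE A (Python) =====
-- def coin_count(value):
--     quarters = 0
--     dimes = 0
--     nickels = 0
--     pennies = 0
--     while value >1:
--         quarters = value // 25
--         value = value - (quarters*25)
--         dimes = value//10
--         value = value - (dimes*10)
--         nickels = value//5
--         value = value - (nickels*5)
--         pennies = value
--         value = 0
--
--     total_coins = quarters+dimes+nickels+pennies
--     return total_coins
-- ===== SOURCE B (Python) =====
-- # Coins needed for each remainder 0..24 after quarters are taken out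
-- # (precomputed once: dimes + nickels + pennies for r cents).
-- _SUBQUARTER = (0, 1, 2, 3, 4, 1, 2, 3, 4, 5, 1, 2, 3, 4, 5,
--                2, 3, 4, 5, 6, 2, 3, 4, 5, 6)
--
-- def coin_count(value):
--     if value <= 1:
--         return 0
--     return value // 25 + _SUBQUARTER[value % 25]
-- ===== Notes on version B (the rewrite author's own statement) =====
-- stated objective: alternative
-- what changed: Replaces the divide-and-subtract greedy cascade with a closed form: one floor division by 25 plus a 25-entry precomputed lookup table giving the coin count of the sub-quarter remainder.
import Mathlib
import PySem

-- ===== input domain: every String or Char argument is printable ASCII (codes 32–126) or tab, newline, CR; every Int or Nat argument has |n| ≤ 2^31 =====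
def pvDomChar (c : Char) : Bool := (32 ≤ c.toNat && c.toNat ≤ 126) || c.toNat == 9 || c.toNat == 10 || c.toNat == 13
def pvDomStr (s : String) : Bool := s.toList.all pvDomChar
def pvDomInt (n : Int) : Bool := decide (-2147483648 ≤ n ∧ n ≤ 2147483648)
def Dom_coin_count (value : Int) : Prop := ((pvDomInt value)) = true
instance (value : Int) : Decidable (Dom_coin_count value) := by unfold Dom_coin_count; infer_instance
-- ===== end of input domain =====

-- B replaces A's divide-and-subtract greedy cascade by a closed form: one floor division by 25
-- plus a 25-entry precomputed lookup table for the sub-quarter remainder (alternative decomposition).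

-- ===== PORT A =====
-- the while loop: its body unconditionally sets value to 0, so it runs at most once;
-- termination measure is whether the condition holds
def coinLoop (quarters dimes nickels pennies value : Int) : Int :=
  if value > 1 then
    let quarters := PySem.Int.floordiv value 25
    let value := value - quarters * 25
    let dimes := PySem.Int.floordiv value 10
    let value := value - dimes * 10
    let nickels := PySem.Int.floordiv value 5
    let value := value - nickels * 5
    let pennies := value
    let value := (0 : Int)
    coinLoop quarters dimes nickels pennies value
  else quarters + dimes + nickels + pennies
termination_by (if value > 1 then 1 else 0 : Nat)
decreasing_by split <;> omega

def coin_count (value : Int) : Int :=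
  coinLoop 0 0 0 0 value

-- ===== PORT B =====
-- the module-level tuple _SUBQUARTER
def subquarter : List Int :=
  [0, 1, 2, 3, 4, 1, 2, 3, 4, 5, 1, 2, 3, 4, 5,
   2, 3, 4, 5, 6, 2, 3, 4, 5, 6]

def coin_count_alt (value : Int) : Int :=
  if value ≤ 1 then 0
  else PySem.Int.floordiv value 25 +
       PySem.List.pyGetD subquarter (PySem.Int.mod value 25) 0

-- ===== PRECONDITION & SPEC =====
def Spec_coin_count (value : Int) (out : Int) : Prop := out = coin_count_alt value
instance (value : Int) (out : Int) : Decidable (Spec_coin_count value out) := by unfold Spec_coin_count; infer_instance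

-- ===== CLAIM (what is proved, stated in full; the proofs are below) =====
def Claim_equal_coin_count : Prop := ∀ (value : Int), Dom_coin_count value → Spec_coin_count value (coin_count value)

-- ===== LEMMAS AND PROOFS =====
-- the table entry at r (0 ≤ r < 25) is the greedy dime/nickel/penny count of r
theorem subquarter_eval (r : Int) (h0 : 0 ≤ r) (h1 : r < 25) :
    PySem.List.pyGetD subquarter r 0 =
      PySem.Int.floordiv r 10 + PySem.Int.floordiv (PySem.Int.mod r 10) 5 +
        PySem.Int.mod (PySem.Int.mod r 10) 5 := by
  interval_cases r <;> decide

-- ===== VERDICT (by name: the statement is the Claim_ definition above) =====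
theorem coin_count_spec : Claim_equal_coin_count := by
  intro value _
  unfold Spec_coin_count coin_count coin_count_alt
  rw [coinLoop]
  by_cases h : value > 1
  · rw [coinLoop]
    have h2 : ¬ value ≤ 1 := by omega
    simp only [h, if_pos, if_neg h2]
    have : ¬ ((0:Int) > 1) := by omega
    rw [if_neg this]
    have hm0 : (0:Int) ≤ PySem.Int.mod value 25 := PySem.Int.mod_nonneg value (by omega)
    have hm1 : PySem.Int.mod value 25 < 25 := PySem.Int.mod_lt value (by omega)
    rw [subquarter_eval _ hm0 hm1]
    have e25 := PySem.Int.floordiv_mul_add_mod value 25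
    have r25 : value - PySem.Int.floordiv value 25 * 25 = PySem.Int.mod value 25 := by omega
    rw [r25]
    have e10 := PySem.Int.floordiv_mul_add_mod (PySem.Int.mod value 25) 10
    have r10 : PySem.Int.mod value 25 - PySem.Int.floordiv (PySem.Int.mod value 25) 10 * 10
             = PySem.Int.mod (PySem.Int.mod value 25) 10 := by omega
    rw [r10]
    have e5 := PySem.Int.floordiv_mul_add_mod (PySem.Int.mod (PySem.Int.mod value 25)  10) 5
    omega
  · have h2 : value ≤ 1 := by omega
    simp [h, h2]
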